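-- pv_equiv track=rewrite | github.com/TrueZorvis/python_stepik.org | balakirev_python/9/9.2/9.2_0.py | find_word
-- ===== SOURCE A (Python) =====
-- def find_word(f, word):
--     g_indx = 0
--     for line in f:
--         indx = 0
--         while(indx != -1):
--             indx = line.find(word, indx)
--             if indx > -1:
--                 yield g_indx + indx
--                 indx += 1
--         g_indx += len(line)
-- ===== SOURCE B (Python) =====
-- def find_word(f, word):
--     # Per-position naive scan with startswith instead of the builtin find while-loop.
--     g_indx = 0
--     for line in f:
--         for i in range(len(line) + 1):
--             if line.startswith(word, i):
--                 yield g_indx + i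
--         g_indx += len(line)
-- ===== Notes on version B (the rewrite author's own statement) =====
-- stated objective: alternative
-- what changed: Replaces the inner while-loop over str.find restart positions with a direct positional scan: for each index i in range(len(line)+1) test line.startswith(word, i), preserving overlapping matches and the empty-word trailing index.
import Mathlib
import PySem

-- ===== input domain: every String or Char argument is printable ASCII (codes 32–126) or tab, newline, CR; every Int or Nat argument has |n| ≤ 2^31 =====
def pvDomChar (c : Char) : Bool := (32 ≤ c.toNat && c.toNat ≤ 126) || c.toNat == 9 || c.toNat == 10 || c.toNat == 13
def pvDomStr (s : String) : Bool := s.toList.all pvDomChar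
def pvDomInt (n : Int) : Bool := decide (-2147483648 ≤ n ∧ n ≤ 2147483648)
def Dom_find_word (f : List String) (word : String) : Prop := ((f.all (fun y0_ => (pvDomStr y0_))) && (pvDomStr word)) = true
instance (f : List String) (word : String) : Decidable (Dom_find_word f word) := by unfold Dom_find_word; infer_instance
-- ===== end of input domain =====

-- B replaces A's while-loop over str.find restart positions with a per-position startswith scan (same cost class); both are generators, so the proved equivalence is about the list of yielded values.

-- ===== PORT A =====
-- the inner 'while indx != -1' loop; the fuel argument (called with len(line)+2, an upper bound on the passes) only makes the same loop total
def find_word_go (line word : String) (g_indx : Int) (indx : Int) : Nat → List Int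
  | 0 => []
  | fuel + 1 =>
    let j := PySem.Str.findFrom line word indx
    if j > -1 then (g_indx + j) :: find_word_go line word g_indx (j + 1) fuel
    else []

def find_word (f : List String) (word : String) : List Int :=
  (f.foldl (fun acc line =>
      (acc.1 ++ find_word_go line word acc.2 0 (line.toList.length + 2),
       acc.2 + PySem.Str.len line)) ([], 0)).1

-- ===== PORT B =====
-- line.startswith(word, i): exact for the indices used here (0 ≤ i ≤ len(line))
def pvStartswithFrom (line word : String) (i : Int) : Bool :=
  PySem.Chars.startswith (line.toList.drop i.toNat) word.toList

def find_word_alt (f : List String) (word : String) : List Int :=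
  (f.foldl (fun acc line =>
      (acc.1 ++ (PySem.List.pyRange 0 (PySem.Str.len line + 1) 1).foldl
          (fun r i => if pvStartswithFrom line word i then r ++ [acc.2 + i] else r) [],
       acc.2 + PySem.Str.len line)) ([], 0)).1

-- ===== PRECONDITION & SPEC =====
def Spec_find_word (f : List String) (word : String) (out : List Int) : Prop := out = find_word_alt f word
instance (f : List String) (word : String) (out : List Int) : Decidable (Spec_find_word f word out) := by unfold Spec_find_word; infer_instance

-- ===== CLAIM (what is proved, stated in full; the proofs are below) =====
def Claim_equal_find_word : Prop := ∀ (f : List String) (word : String), Dom_find_word f word → Spec_find_word f word (find_word f word)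

-- ===== LEMMAS AND PROOFS =====

-- a prefix of a later drop is an infix of an earlier drop
theorem pv_prefix_drop_infix {w s : List Char} {k i : Nat} (hk : k ≤ i)
    (h : w <+: s.drop i) : w <:+: s.drop k := by
  have : s.drop i = (s.drop k).drop (i - k) := by
    rw [List.drop_drop]; congr 1; omega
  rw [this] at h
  exact h.isInfix.trans (List.drop_suffix _ _).isInfix

-- str.find from a start past the end is -1 (even for the empty needle)
theorem pv_findFrom_past (s w : List Char) :
    PySem.Chars.findFrom s w ((s.length + 1 : Nat) : Int) = -1 := by
  simp [PySem.Chars.findFrom]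
  split_ifs <;> intro h <;> omega

-- one unfolding step of A's inner loop
theorem pv_go_succ (line word : String) (g_indx indx : Int) (fuel : Nat) :
    find_word_go line word g_indx indx (fuel + 1) =
      (if PySem.Str.findFrom line word indx > -1 then
        (g_indx + PySem.Str.findFrom line word indx) ::
          find_word_go line word g_indx (PySem.Str.findFrom line word indx + 1) fuel
       else []) := rfl

-- A's inner loop, started at position k, yields exactly the match positions ≥ k
theorem pv_go_eq (line word : String) (g : Int) :
    ∀ (fuel k : Nat), k ≤ line.toList.length + 1 → line.toList.length + 2 - k ≤ fuel →
    find_word_go line word g (↑k) fuel =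
      List.map (fun i : Nat => g + (i : Int))
        (List.filter (fun i : Nat => PySem.Chars.startswith (line.toList.drop i) word.toList)
          (List.range' k (line.toList.length + 1 - k))) := by
  intro fuel
  induction fuel with
  | zero => intro k hk hfuel; exact absurd hfuel (by omega)
  | succ fuel ih =>
    intro k hk hfuel
    by_cases hk1 : k = line.toList.length + 1
    · subst hk1
      have hfind : PySem.Str.findFrom line word (↑(line.toList.length + 1)) = -1 := by
        rw [PySem.Str.findFrom_eq]; exact pv_findFrom_past _ _
      rw [pv_go_succ, hfind, if_neg (by norm_num), Nat.sub_self]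
      simp
    · have hk' : k ≤ line.toList.length := by omega
      by_cases hneg : PySem.Chars.findFrom line.toList word.toList (↑k) = -1
      · have hno : ¬ word.toList <:+: line.toList.drop k :=
          (PySem.Chars.findFrom_natCast_eq_neg_one_iff line.toList word.toList k hk').mp hneg
        have hfilter : List.filter (fun i : Nat => PySem.Chars.startswith (line.toList.drop i) word.toList)
            (List.range' k (line.toList.length + 1 - k)) = [] := by
          rw [List.filter_eq_nil_iff]
          intro i hi
          rw [List.mem_range'_1] at hi
          intro hps
          exact hno (pv_prefix_drop_infix hi.1
            ((PySem.Chars.startswith_iff _ _).mp hps))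
        rw [pv_go_succ, show PySem.Str.findFrom line word (↑k) = -1 from by
              rw [PySem.Str.findFrom_eq]; exact hneg,
            if_neg (by norm_num), hfilter]
        rfl
      · obtain ⟨hge, hpre, hmin⟩ :=
          PySem.Chars.findFrom_natCast_spec line.toList word.toList k hk' hneg
        set j := PySem.Chars.findFrom line.toList word.toList (↑k) with hj
        have hjle : j ≤ line.toList.length := by
          rw [PySem.Chars.findFrom_natCast line.toList word.toList k hk'] at hj
          have h1 := PySem.Chars.find_le_length (line.toList.drop k) word.toList
          rw [List.length_drop] at h1
          rw [hj]; split <;> omega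
        set m := j.toNat with hm
        have hjm : j = (m : Int) := by omega
        have hkm : k ≤ m := by omega
        have hmle : m ≤ line.toList.length := by omega
        have hsplit : List.range' k (line.toList.length + 1 - k) =
            List.range' k (m - k) ++ m :: List.range' (m + 1) (line.toList.length - m) := by
          rw [show line.toList.length + 1 - k = (m - k) + (line.toList.length + 1 - m) from by omega,
              ← List.range'_append_1,
              show k + (m - k) = m from by omega,
              show line.toList.length + 1 - m = (line.toList.length - m) + 1 from by omega,
              List.range'_succ]
        have hfilter1 : List.filter (fun i : Nat => PySem.Chars.startswith (line.toList.drop i) word.toList)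
            (List.range' k (m - k)) = [] := by
          rw [List.filter_eq_nil_iff]
          intro i hi
          rw [List.mem_range'_1] at hi
          intro hps
          exact (hmin i hi.1 (by omega)) ((PySem.Chars.startswith_iff _ _).mp hps)
        have hpm : PySem.Chars.startswith (line.toList.drop m) word.toList = true :=
          (PySem.Chars.startswith_iff _ _).mpr hpre
        have htail := ih (m + 1) (by omega) (by omega)
        rw [show line.toList.length + 1 - (m + 1) = line.toList.length - m from by omega] at htail
        rw [pv_go_succ]
        rw [show PySem.Str.findFrom line word (↑k) = j from by rw [PySem.Str.findFrom_eq, hj]]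
        rw [if_pos (by omega)]
        rw [hsplit, List.filter_append, hfilter1, List.nil_append,
            List.filter_cons, if_pos hpm, List.map_cons]
        rw [hjm, show ((m : Int) + 1) = ((m + 1 : Nat) : Int) from by push_cast; ring, htail]

-- one line of A equals one line of B
theorem pv_line_eq (line word : String) (g : Int) :
    find_word_go line word g 0 (line.toList.length + 2) =
      (PySem.List.pyRange 0 (PySem.Str.len line + 1) 1).foldl
        (fun r i => if pvStartswithFrom line word i then r ++ [g + i] else r) [] := by
  have h0 := pv_go_eq line word g (line.toList.length + 2) 0 (by omega) (by omega)
  rw [show ((0 : Nat) : Int) = 0 from rfl, Nat.sub_zero] at h0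
  rw [h0]
  rw [show PySem.Str.len line + 1 = ((line.toList.length + 1 : Nat) : Int) from by
        rw [PySem.Str.len_eq]; push_cast; ring]
  rw [PySem.List.pyRange_zero_natCast, List.foldl_map]
  rw [PySem.List.foldl_append_if (fun i : Nat => pvStartswithFrom line word (↑i))
        (fun i : Nat => g + (i : Int)) (List.range (line.toList.length + 1)) []]
  simp only [List.nil_append, pvStartswithFrom, Int.toNat_natCast]
  congr 1
  rw [List.range_eq_range']

-- the two outer folds agree from any accumulator state
theorem pv_outer (word : String) :
    ∀ (f : List String) (p : List Int × Int),
    (f.foldl (fun acc line =>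
        (acc.1 ++ find_word_go line word acc.2 0 (line.toList.length + 2),
         acc.2 + PySem.Str.len line)) p) =
    (f.foldl (fun acc line =>
        (acc.1 ++ (PySem.List.pyRange 0 (PySem.Str.len line + 1) 1).foldl
            (fun r i => if pvStartswithFrom line word i then r ++ [acc.2 + i] else r) [],
         acc.2 + PySem.Str.len line)) p) := by
  intro f
  induction f with
  | nil => intro p; rfl
  | cons line rest ih =>
    intro p
    simp only [List.foldl_cons]
    rw [pv_line_eq line word p.2]
    exact ih _

-- ===== VERDICT (by name: the statement is the Claim_ definition above) =====
theorem find_word_spec : Claim_equal_find_word := by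
  intro f word _
  unfold Spec_find_word find_word find_word_alt
  rw [pv_outer word f ([], 0)]
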